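-- pv_equiv track=rewrite | github.com/AbrilFranco/API | app.py | dfs
-- ===== SOURCE A (Python) =====
-- def dfs(estado_inicial, estado_final, path=None, visited=None):
--     if path is None:
--         path = [estado_inicial]
--     if visited is None:
--         visited = set()
--
--     state = path[-1]
--     if state == estado_final:
--         return path
--
--     visited.add(tuple(state))
--
--     for i in range(len(state) - 1):
--         new_state = state[:]
--         new_state[i], new_state[i + 1] = new_state[i + 1], new_state[i]
--
--         if tuple(new_state) not in visited:
--             new_path = dfs(estado_inicial, estado_final, path + [new_state], visited)
--             if new_path:
--                 return new_path
--
--     return None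
-- ===== SOURCE B (Python) =====
-- def dfs(estado_inicial, estado_final, path=None, visited=None):
--     if path is None:
--         path = [estado_inicial]
--     if visited is None:
--         visited = set()
--     stack = [path]
--     while stack:
--         cur = stack.pop()
--         state = cur[-1]
--         if tuple(state) in visited:
--             continue
--         if state == estado_final:
--             return cur
--         visited.add(tuple(state))
--         for i in reversed(range(len(state) - 1)):
--             ns = state[:]
--             ns[i], ns[i + 1] = ns[i + 1], ns[i]
--             stack.append(cur + [ns])
--     return None
-- ===== Notes on version B (the rewrite author's own statement) =====
-- stated objective: alternative
-- what changed: A's recursive DFS (one Python call per expanded node, with an in-call child loop) is replaced by an iterative while-loop over an explicit stack of partial paths with pop-time pruning, pushing adjacent-swap neighbours in reverse so they are explored left-to-right; same search order and identical result.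
-- outside the precondition, e.g. on dfs([1, 2], [2, 1], None, {(1, 2)}): A returns [[1, 2], [2, 1]], B returns None; on dfs([1], [1], None, {(1,)}): A returns [[1]], B returns None
import Mathlib
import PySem

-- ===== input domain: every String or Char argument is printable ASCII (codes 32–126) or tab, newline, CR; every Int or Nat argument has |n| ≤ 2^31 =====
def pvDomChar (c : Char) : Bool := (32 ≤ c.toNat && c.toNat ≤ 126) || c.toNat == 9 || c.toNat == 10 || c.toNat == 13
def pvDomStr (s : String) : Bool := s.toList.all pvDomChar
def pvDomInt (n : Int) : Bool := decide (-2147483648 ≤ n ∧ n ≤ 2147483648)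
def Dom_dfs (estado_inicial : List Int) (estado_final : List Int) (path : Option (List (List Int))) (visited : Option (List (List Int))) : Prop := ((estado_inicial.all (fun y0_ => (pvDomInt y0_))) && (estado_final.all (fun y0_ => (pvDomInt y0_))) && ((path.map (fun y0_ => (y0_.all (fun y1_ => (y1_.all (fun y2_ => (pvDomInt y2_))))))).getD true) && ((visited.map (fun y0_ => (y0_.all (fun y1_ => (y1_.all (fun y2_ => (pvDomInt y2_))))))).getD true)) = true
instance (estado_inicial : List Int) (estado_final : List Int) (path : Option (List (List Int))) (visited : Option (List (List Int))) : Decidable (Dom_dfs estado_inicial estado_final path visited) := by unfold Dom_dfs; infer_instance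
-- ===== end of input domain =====

-- B replaces A's recursive DFS by an iterative loop over an explicit stack of partial paths with
-- pop-time pruning (objective: alternative decomposition, same search order and result).
-- Both versions mutate the caller's `visited` set in place identically; equivalence is about the return value.
-- The `fuel` arguments below are pure totality guards: fuel = (length of the start state)! + 1 bounds the
-- recursion depth (each level adds one previously-unvisited permutation of the start state, of which there
-- are at most length! many), so fuel is never exhausted on any actual run.

-- shared tiny helper: new_state = state[:]; new_state[i], new_state[i+1] = new_state[i+1], new_state[i]
-- (exact for the in-range indices i, i+1 < state.length produced by range(len(state)-1))
def swapAdj (s : List Int) (i : Nat) : List Int :=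
  (s.set i (s.getD (i + 1) 0)).set (i + 1) (s.getD i 0)

-- ===== PORT A =====
-- body of A after the default handling: state = path[-1]; final check; visited.add; the for-loop.
-- A's `for i in range(len(state)-1)` loop is the helper dfsLoopC; it receives A's recursive call
-- (at the next fuel level) as the continuation `go`, threading the mutated visited set between iterations.
def dfsLoopC (go : List (List Int) → PySem.Set (List Int) → Option (List (List Int)) × PySem.Set (List Int))
    (path : List (List Int)) (state : List Int) (idxs : List Nat) (v : PySem.Set (List Int)) :
    Option (List (List Int)) × PySem.Set (List Int) :=
  match idxs with
  | [] => (none, v)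
  | i :: rest =>
    let ns := swapAdj state i
    if PySem.Set.contains v ns then dfsLoopC go path state rest v
    else
      match go (path ++ [ns]) v with
      | (some r, v') => (some r, v')
      | (none, v') => dfsLoopC go path state rest v'

def dfsGo (ef : List Int) : Nat → List (List Int) → PySem.Set (List Int) →
    Option (List (List Int)) × PySem.Set (List Int)
  | 0, _, v => (none, v)   -- never reached: fuel bounds the recursion depth
  | f + 1, path, v =>
    let state := path.getLast?.getD []
    if state = ef then (some path, v)
    else dfsLoopC (dfsGo ef f) path state (List.range (state.length - 1)) (PySem.Set.add v state)

def dfs (estado_inicial : List Int) (estado_final : List Int) (path : Option (List (List Int))) (visited : Option (List (List Int))) : Option (List (List Int)) :=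
  let p := path.getD [estado_inicial]
  let v : PySem.Set (List Int) := PySem.Set.ofList (visited.getD [])
  (dfsGo estado_final (Nat.factorial (p.getLast?.getD []).length + 1) p v).1

-- ===== PORT B =====
-- termination measure for the stack machine (proof-only weight, not part of B's algorithm)
def pvWeight (e : Nat × List (List Int)) : Nat := ((e.2.getLast?.getD []).length + 1) ^ e.1
def pvMeasure (stack : List (Nat × List (List Int))) : Nat := (stack.map pvWeight).sum

-- `for i in reversed(range(n)): stack.append(c i)` with head-as-top stacks is map-prepending
theorem revPush {α β : Type} (f : α → β) (l : List α) (st : List β) :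
    l.reverse.foldl (fun s x => f x :: s) st = l.map f ++ st := by
  induction l generalizing st with
  | nil => rfl
  | cons a l ih =>
    simp only [List.reverse_cons, List.foldl_append, List.foldl_cons, List.foldl_nil, List.map]
    rw [ih]; simp

theorem pvMeasure_cons (e : Nat × List (List Int)) (s : List (Nat × List (List Int))) :
    pvMeasure (e :: s) = pvWeight e + pvMeasure s := by
  simp [pvMeasure, pvWeight]

theorem pvWeight_pos (e : Nat × List (List Int)) : 0 < pvWeight e :=
  Nat.pow_pos (Nat.succ_pos _)

theorem pvMeasure_children (g : Nat) (cur : List (List Int)) (state : List Int)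
    (rest : List (Nat × List (List Int))) :
    pvMeasure ((List.range (state.length - 1)).reverse.foldl
        (fun st i => (g, cur ++ [swapAdj state i]) :: st) rest)
      = (state.length - 1) * (state.length + 1) ^ g + pvMeasure rest := by
  rw [revPush (fun i => (g, cur ++ [swapAdj state i]))]
  simp only [pvMeasure, List.map_append, List.sum_append, List.map_map]
  have h : ∀ i : Nat, (pvWeight ∘ fun i => (g, cur ++ [swapAdj state i])) i
      = (state.length + 1) ^ g := by
    intro i
    simp [pvWeight, swapAdj, Function.comp]
  rw [List.map_congr_left (fun i _ => h i)]
  simp [List.map_const', Nat.mul_comm]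

-- the three decreasing facts for dfsRun's termination measure, as standalone lemmas
theorem pvDecPop (f : Nat) (cur : List (List Int)) (rest : List (Nat × List (List Int))) :
    pvMeasure rest < pvMeasure ((f, cur) :: rest) := by
  rw [pvMeasure_cons]; exact Nat.lt_add_of_pos_left (pvWeight_pos (f, cur))

theorem pvDecExpand (g : Nat) (cur : List (List Int)) (rest : List (Nat × List (List Int))) :
    pvMeasure ((List.range (((cur.getLast?.getD []).length) - 1)).reverse.foldl
        (fun st i => (g, cur ++ [swapAdj (cur.getLast?.getD []) i]) :: st) rest)
      < pvMeasure ((g + 1, cur) :: rest) := by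
  rw [pvMeasure_children, pvMeasure_cons]
  simp only [pvWeight]
  have hp : 0 < ((cur.getLast?.getD []).length + 1) ^ g := Nat.pow_pos (Nat.succ_pos _)
  have h2 : ((cur.getLast?.getD []).length - 1) * ((cur.getLast?.getD []).length + 1) ^ g
      < ((cur.getLast?.getD []).length + 1) ^ (g + 1) := by
    rw [pow_succ']
    exact Nat.mul_lt_mul_of_lt_of_le
      (Nat.lt_succ_of_le (Nat.sub_le _ _)) (Nat.le_refl _) hp
  exact Nat.add_lt_add_right h2 (pvMeasure rest)

-- B's while-loop: stack of (remaining fuel, partial path); head of the list is the top of the stack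
def dfsRun (ef : List Int) (stack : List (Nat × List (List Int))) (v : PySem.Set (List Int)) :
    Option (List (List Int)) :=
  match stack with
  | [] => none
  | (f, cur) :: rest =>
    let state := cur.getLast?.getD []
    if PySem.Set.contains v state then dfsRun ef rest v
    else
      match f with
      | 0 => dfsRun ef rest v   -- never reached: fuel bounds the depth
      | g + 1 =>
        if state = ef then some cur
        else dfsRun ef
          ((List.range (state.length - 1)).reverse.foldl
            (fun st i => (g, cur ++ [swapAdj state i]) :: st) rest)
          (PySem.Set.add v state)
termination_by pvMeasure stack
decreasing_by
  · exact pvDecPop (f, cur).1 cur rest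
  · exact pvDecPop 0 cur rest
  · exact pvDecExpand g cur rest

def dfs_alt (estado_inicial : List Int) (estado_final : List Int) (path : Option (List (List Int))) (visited : Option (List (List Int))) : Option (List (List Int)) :=
  let p := path.getD [estado_inicial]
  let v : PySem.Set (List Int) := PySem.Set.ofList (visited.getD [])
  dfsRun estado_final [(Nat.factorial (p.getLast?.getD []).length + 1, p)] v

-- ===== PRECONDITION & SPEC =====
-- Pre_ excludes (a) path = some [], on which A raises IndexError (path[-1]), and (b) calls whose supplied
-- visited set already contains the start state — an unspecified corner: A expands the start regardless of
-- visited (even returning it when it equals the goal), while B's uniform pop-time pruning skips it.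
def Pre_dfs (estado_inicial : List Int) (estado_final : List Int) (path : Option (List (List Int))) (visited : Option (List (List Int))) : Prop :=
  path ≠ some [] ∧ ((path.getD [estado_inicial]).getLast?.getD []) ∉ (visited.getD [])
instance (estado_inicial : List Int) (estado_final : List Int) (path : Option (List (List Int))) (visited : Option (List (List Int))) : Decidable (Pre_dfs estado_inicial estado_final path visited) := by unfold Pre_dfs; infer_instance
def pvWitness_dfs : List Int × List Int × Option (List (List Int)) × Option (List (List Int)) :=
  ([1, 2, 3], [3, 2, 1], none, none)
def Spec_dfs (estado_inicial : List Int) (estado_final : List Int) (path : Option (List (List Int))) (visited : Option (List (List Int))) (out : Option (List (List Int))) : Prop := out = dfs_alt estado_inicial estado_final path visited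
instance (estado_inicial : List Int) (estado_final : List Int) (path : Option (List (List Int))) (visited : Option (List (List Int))) (out : Option (List (List Int))) : Decidable (Spec_dfs estado_inicial estado_final path visited out) := by unfold Spec_dfs; infer_instance

-- ===== CLAIM (what is proved, stated in full; the proofs are below) =====
def Claim_equal_dfs : Prop := ∀ (estado_inicial : List Int) (estado_final : List Int) (path : Option (List (List Int))) (visited : Option (List (List Int))), Dom_dfs estado_inicial estado_final path visited → Pre_dfs estado_inicial estado_final path visited → Spec_dfs estado_inicial estado_final path visited (dfs estado_inicial estado_final path visited)

-- ===== LEMMAS AND PROOFS =====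

-- SIMULATION: popping one (fuel, path) entry off B's stack behaves like A's loop-side visited check
-- followed by a recursive call dfsGo, whose leftover visited set the rest of the stack then sees.
theorem sim_go (ef : List Int) (f : Nat) :
    ∀ (cur : List (List Int)) (rest : List (Nat × List (List Int))) (v : PySem.Set (List Int)),
      dfsRun ef ((f, cur) :: rest) v =
        (if PySem.Set.contains v (cur.getLast?.getD []) then dfsRun ef rest v
         else match dfsGo ef f cur v with
              | (some r, _) => some r
              | (none, v') => dfsRun ef rest v') := by
  induction f with
  | zero =>
    intro cur rest v
    rw [dfsRun]
    simp only [dfsGo]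
  | succ g ih =>
    intro cur rest v
    rw [dfsRun]
    by_cases hmem : PySem.Set.contains v (cur.getLast?.getD []) = true
    · have hm' : cur.getLast?.getD [] ∈ v := by simpa using hmem
      simp [hm']
    · simp only [Bool.not_eq_true] at hmem
      simp only [hmem, if_false, Bool.false_eq_true]
      by_cases hfin : cur.getLast?.getD [] = ef
      · simp [dfsGo, hfin]
      · simp only [hfin, if_false, dfsGo]
        -- the pushed children, as a map prepended to the rest of the stack
        rw [revPush (fun i => (g, cur ++ [swapAdj (cur.getLast?.getD []) i]))]
        -- inner induction over the loop indices, using `ih` (sim at fuel g) for each child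
        have hloop : ∀ (idxs : List Nat) (rest : List (Nat × List (List Int)))
            (w : PySem.Set (List Int)),
            dfsRun ef ((idxs.map fun i => (g, cur ++ [swapAdj (cur.getLast?.getD []) i])) ++ rest) w =
              match dfsLoopC (dfsGo ef g) cur (cur.getLast?.getD []) idxs w with
              | (some r, _) => some r
              | (none, w') => dfsRun ef rest w' := by
          intro idxs
          induction idxs with
          | nil => intro rest w; simp [dfsLoopC]
          | cons i is ihl =>
            intro rest w
            simp only [List.map_cons, List.cons_append]
            rw [ih (cur ++ [swapAdj (cur.getLast?.getD []) i])]
            have hlast : ((cur ++ [swapAdj (cur.getLast?.getD []) i]).getLast?.getD [])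
                = swapAdj (cur.getLast?.getD []) i := by
              simp
            rw [hlast]
            by_cases hm : PySem.Set.contains w (swapAdj (cur.getLast?.getD []) i) = true
            · simp only [hm, if_true]
              rw [ihl]
              simp only [dfsLoopC, hm, if_true]
            · simp only [Bool.not_eq_true] at hm
              simp only [hm, if_false, Bool.false_eq_true]
              rcases hgo : dfsGo ef g (cur ++ [swapAdj (cur.getLast?.getD []) i]) w with ⟨res, w'⟩
              cases res with
              | some r => simp only [dfsLoopC, hm, hgo, Bool.false_eq_true, if_false]
              | none =>
                simp only [dfsLoopC, hm, hgo, Bool.false_eq_true, if_false]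
                exact ihl rest w'
        exact hloop (List.range ((cur.getLast?.getD []).length - 1)) rest
          (PySem.Set.add v (cur.getLast?.getD []))

-- ===== VERDICT (by name: the statement is the Claim_ definition above) =====
theorem dfs_spec : Claim_equal_dfs := by
  intro ei ef path visited _hdom hpre
  unfold Spec_dfs dfs dfs_alt
  rw [sim_go]
  have hmem : PySem.Set.contains (PySem.Set.ofList (visited.getD []))
      ((path.getD [ei]).getLast?.getD []) = false := by
    rcases hpre with ⟨-, hnot⟩
    simp only [PySem.Set.contains_eq_listContains]
    simpa [PySem.Set.mem_ofList] using hnot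
  simp only [hmem, if_false, Bool.false_eq_true]
  rcases hgo : dfsGo ef (Nat.factorial ((path.getD [ei]).getLast?.getD []).length + 1)
      (path.getD [ei]) (PySem.Set.ofList (visited.getD [])) with ⟨res, v'⟩
  cases res <;> simp [dfsRun]
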